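-- pv_equiv track=rewrite | github.com/Desipeli/tiralabra | lausegeneraattori/src/jasennin.py | poista_gutenberg
-- ===== SOURCE A (Python) =====
-- def poista_gutenberg(sanat: list) -> list:
--     """
--     Päätellään *** esiintymisien perusteella alku ja loppu.
--     Joissain kirjoissa *** on kiinni sanassa, joten tarkastettava sisältyykö
--     se millään tavalla sanaan.
--     """
--     tahtia = 0
--     lopullinen_lista_sanoja = []
--     for sana in sanat:
--         if "***" in sana:
--             tahtia += 1
--             continue
--         if tahtia > 2:
--             break
--         if tahtia == 2:
--             lopullinen_lista_sanoja.append(sana)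
--     return lopullinen_lista_sanoja
-- ===== SOURCE B (Python) =====
-- def poista_gutenberg(sanat: list) -> list:
--     """Advance past the first two '***' marker words, then collect words
--     until the next marker word (or the end)."""
--     def skip_past_marker(it):
--         # consume the iterator up to and including the first marker word;
--         # True if a marker was found, False if the iterator was exhausted
--         for sana in it:
--             if "***" in sana:
--                 return True
--         return False
--
--     it = iter(sanat)
--     if not skip_past_marker(it):
--         return []
--     if not skip_past_marker(it):
--         return []
--     out = []
--     for sana in it:
--         if "***" in sana:
--             break
--         out.append(sana)
--     return out
-- ===== Notes on version B (the rewrite author's own statement) =====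
-- stated objective: simpler
-- what changed: Replaces A's single-pass counter state machine (counting markers with continue/break) by a three-phase decomposition: drop through the first marker, drop through the second, then take words until the next marker.
import Mathlib
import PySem

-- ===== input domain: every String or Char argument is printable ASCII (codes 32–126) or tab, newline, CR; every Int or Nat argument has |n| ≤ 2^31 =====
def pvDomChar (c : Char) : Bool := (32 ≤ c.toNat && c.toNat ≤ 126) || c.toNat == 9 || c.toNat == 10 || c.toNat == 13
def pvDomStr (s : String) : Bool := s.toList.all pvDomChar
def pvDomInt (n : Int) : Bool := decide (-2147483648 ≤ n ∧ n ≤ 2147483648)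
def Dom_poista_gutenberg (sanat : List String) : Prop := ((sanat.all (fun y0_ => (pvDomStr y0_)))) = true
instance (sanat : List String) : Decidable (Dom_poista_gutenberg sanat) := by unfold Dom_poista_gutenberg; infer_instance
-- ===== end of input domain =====

-- B replaces A's counter state machine by drop-through-two-markers then take-until-marker (objective: simpler).

-- ===== PORT A =====
-- A's loop with `continue`/`break`, as structural recursion over the word list
-- carrying the marker counter `tahtia`; the accumulator becomes the returned prefix.
def poistaGutenbergGo (tahtia : Int) : List String → List String
  | [] => []
  | sana :: rest =>
    if PySem.Str.isIn "***" sana then poistaGutenbergGo (tahtia + 1) rest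
    else if tahtia > 2 then []
    else if tahtia == 2 then sana :: poistaGutenbergGo tahtia rest
    else poistaGutenbergGo tahtia rest

def poista_gutenberg (sanat : List String) : List String :=
  poistaGutenbergGo 0 sanat

-- ===== PORT B =====
-- Source B's skip_past_marker: the iterator becomes the remaining suffix; `some rest` =
-- marker found (True) with `rest` what is left of the iterator, `none` = exhausted (False)
def pgAfterMarker : List String → Option (List String)
  | [] => none
  | head :: xs => if PySem.Str.isIn "***" head then some xs else pgAfterMarker xs

-- Source B's final loop: keep words until the next marker word
def pgTakeUntilMarker : List String → List String
  | [] => []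
  | sana :: rest =>
    if PySem.Str.isIn "***" sana then [] else sana :: pgTakeUntilMarker rest

def poista_gutenberg_alt (sanat : List String) : List String :=
  match pgAfterMarker sanat with
  | none => []
  | some rest =>
    match pgAfterMarker rest with
    | none => []
    | some rest2 => pgTakeUntilMarker rest2

-- ===== PRECONDITION & SPEC =====
def Spec_poista_gutenberg (sanat : List String) (out : List String) : Prop := out = poista_gutenberg_alt sanat
instance (sanat : List String) (out : List String) : Decidable (Spec_poista_gutenberg sanat out) := by unfold Spec_poista_gutenberg; infer_instance

-- ===== CLAIM (what is proved, stated in full; the proofs are below) =====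
def Claim_equal_poista_gutenberg : Prop := ∀ (sanat : List String), Dom_poista_gutenberg sanat → Spec_poista_gutenberg sanat (poista_gutenberg sanat)

-- ===== LEMMAS AND PROOFS =====

-- once the counter has passed 2, the first non-marker word breaks: the result is []
theorem pgGo_ge3 : ∀ (xs : List String) (t : Int), t > 2 → poistaGutenbergGo t xs = [] := by
  intro xs
  induction xs with
  | nil => intro t _; simp [poistaGutenbergGo]
  | cons s r ih =>
    intro t ht
    simp only [poistaGutenbergGo]
    split
    · exact ih (t + 1) (by omega)
    · simp

-- at counter 2 the loop appends until the next marker word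
theorem pgGo_two : ∀ xs : List String, poistaGutenbergGo 2 xs = pgTakeUntilMarker xs := by
  intro xs
  induction xs with
  | nil => rfl
  | cons s r ih =>
    simp only [poistaGutenbergGo, pgTakeUntilMarker]
    split
    · exact pgGo_ge3 r 3 (by omega)
    · simp [ih]

-- at counter 1 the loop skips to just after the next marker word, then behaves as counter 2
theorem pgGo_one : ∀ xs : List String,
    poistaGutenbergGo 1 xs =
      (match pgAfterMarker xs with
       | none => []
       | some rest => pgTakeUntilMarker rest) := by
  intro xs
  induction xs with
  | nil => rfl
  | cons s r ih =>
    simp only [poistaGutenbergGo, pgAfterMarker]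
    split
    · simpa using pgGo_two r
    · simpa using ih

-- ===== VERDICT (by name: the statement is the Claim_ definition above) =====
theorem poista_gutenberg_spec : Claim_equal_poista_gutenberg := by
  intro sanat hd
  clear hd
  unfold Spec_poista_gutenberg poista_gutenberg poista_gutenberg_alt
  induction sanat with
  | nil => rfl
  | cons s r ih =>
    simp only [poistaGutenbergGo, pgAfterMarker]
    split
    · simpa using pgGo_one r
    · simpa using ih
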